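-- pv_equiv track=rewrite | github.com/behroozmn/SohoTemp | pylibs/samba.py | _parse_pdbedit_output
-- ===== SOURCE A (Python) =====
-- from typing import Dict, Any, List, Optional, Union
--
-- def _parse_pdbedit_output(output: str) -> List[Dict[str, str]]:
--     """
--     تجزیه خروجی دستور `pdbedit -L -v` که از '---------------' برای جداکردن کاربران استفاده می‌کند.
--
--     Args:
--         output: خروجی خام دستور pdbedit.
--
--     Returns:
--         لیستی از دیکشنری‌های حاوی جزئیات هر کاربر.
--     """
--     users = []
--     current = {}
--     lines = output.strip().split("\n")
--
--     for line in lines: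
--         stripped = line.strip()
--         if stripped == "---------------":
--             if current:
--                 users.append(current)
--                 current = {}
--             continue
--
--         if not stripped or ": " not in stripped:
--             continue
--
--         key, val = stripped.split(": ", 1)
--         key = key.strip()
--         val = val.strip()
--         current[key] = val
--
--     if current:
--         users.append(current)
--
--     return users
-- ===== SOURCE B (Python) =====
-- def _parse_pdbedit_output(output):
--     """Recursive block decomposition: split the line list at the first
--     separator, build each block's dict from its ': ' lines in one comprehension,
--     keep non-empty dicts."""
--     def parse(lines):
--         if not lines:
--             return []
--         i = next((j for j, l in enumerate(lines)
--                   if l.strip() == "---------------"), len(lines))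
--         strips = [l.strip() for l in lines[:i]]
--         d = dict(tuple(p.strip() for p in s.split(": ", 1))
--                  for s in strips if ": " in s)
--         return ([d] if d else []) + parse(lines[i + 1:])
--     return parse(output.strip().split("\n"))
-- ===== Notes on version B (the rewrite author's own statement) =====
-- stated objective: alternative
-- what changed: Replaces A's single stateful loop with a mutable current-dict by a recursive decomposition that splits the line list at the first separator, builds each block's dict in one comprehension, and keeps non-empty blocks.
import Mathlib
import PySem

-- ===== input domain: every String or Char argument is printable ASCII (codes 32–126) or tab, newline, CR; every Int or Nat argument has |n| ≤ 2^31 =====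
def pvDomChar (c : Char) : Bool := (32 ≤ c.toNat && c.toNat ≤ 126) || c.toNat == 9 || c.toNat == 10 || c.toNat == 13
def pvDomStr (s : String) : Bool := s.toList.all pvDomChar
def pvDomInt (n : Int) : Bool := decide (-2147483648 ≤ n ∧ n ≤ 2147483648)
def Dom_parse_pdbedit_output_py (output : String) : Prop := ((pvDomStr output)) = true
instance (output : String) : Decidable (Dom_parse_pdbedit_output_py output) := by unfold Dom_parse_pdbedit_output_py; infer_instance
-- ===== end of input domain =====

-- B replaces A's single stateful accumulation loop by a recursive split-at-first-separator
-- decomposition with a per-block dict comprehension (objective: alternative; return value only).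

-- ===== PORT A =====
-- one iteration of A's for-loop: state = (users, current)
def pbStep (st : List (List (String × String)) × PySem.Dict String String) (line : String) :
    List (List (String × String)) × PySem.Dict String String :=
  let stripped := PySem.Str.strip line
  if stripped = "---------------" then
    if st.2.items ≠ [] then (st.1 ++ [st.2.items], PySem.Dict.empty) else st
  else if stripped = "" ∨ PySem.Str.isIn ": " stripped = false then st
  else
    match PySem.Str.splitMax? stripped ": " 1 with
    | some [k, v] => (st.1, st.2.insert (PySem.Str.strip k) (PySem.Str.strip v))
    | _ => st   -- unreachable: ": " occurs in stripped, so the split has exactly two parts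

def parse_pdbedit_output_py (output : String) : List (List (String × String)) :=
  let lines := (PySem.Str.split? (PySem.Str.strip output) "\n").getD []   -- sep "\n" ≠ "": never none
  let r := lines.foldl pbStep (([] : List (List (String × String))), PySem.Dict.empty)
  if r.2.items ≠ [] then r.1 ++ [r.2.items] else r.1

-- ===== PORT B =====
-- the dict of one separator-free block (Python's dict(...) over a generator of stripped pairs)
def pbAltBlockDict (block : List String) : PySem.Dict String String :=
  PySem.Dict.ofList
    (((block.map PySem.Str.strip).filter (fun s => PySem.Str.isIn ": " s)).map
      (fun s => match PySem.Str.splitMax? s ": " 1 with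
                | some [k, v] => (PySem.Str.strip k, PySem.Str.strip v)
                | _ => ("", "")))   -- unreachable: the filter guarantees two parts

def pbAltGo (lines : List String) : List (List (String × String)) :=
  match lines with
  | [] => []
  | l :: rest =>
    let i := ((l :: rest).findIdx? (fun s => PySem.Str.strip s = "---------------")).getD (rest.length + 1)
    let d := pbAltBlockDict ((l :: rest).take i)
    (if d.items = [] then [] else [d.items]) ++ pbAltGo ((l :: rest).drop (i + 1))
  termination_by lines.length
  decreasing_by simp

def parse_pdbedit_output_py_alt (output : String) : List (List (String × String)) :=
  pbAltGo ((PySem.Str.split? (PySem.Str.strip output) "\n").getD [])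

-- ===== PRECONDITION & SPEC =====
def Spec_parse_pdbedit_output_py (output : String) (out : List (List (String × String))) : Prop := out = parse_pdbedit_output_py_alt output
instance (output : String) (out : List (List (String × String))) : Decidable (Spec_parse_pdbedit_output_py output out) := by unfold Spec_parse_pdbedit_output_py; infer_instance

-- ===== CLAIM (what is proved, stated in full; the proofs are below) =====
def Claim_equal_parse_pdbedit_output_py : Prop := ∀ (output : String), Dom_parse_pdbedit_output_py output → Spec_parse_pdbedit_output_py output (parse_pdbedit_output_py output)

-- ===== LEMMAS AND PROOFS =====

-- splitOnMax.go with maxsplit already 0 returns the rest as one final piece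
theorem pb_go_zero (sep : List Char) (fuel : Nat) (l cur : List Char) (acc : List (List Char)) :
    PySem.Chars.splitOnMax.go sep fuel 0 l cur acc = ((cur.reverse ++ l) :: acc).reverse := by
  cases fuel with
  | zero => rfl
  | succ m => cases l with
    | nil => simp [PySem.Chars.splitOnMax.go]
    | cons c cs => simp [PySem.Chars.splitOnMax.go]

-- with maxsplit 1 and the separator occurring in l, go produces exactly two more pieces
theorem pb_go_one (sep : List Char) (hsep : sep ≠ []) (fuel : Nat) (l cur : List Char)
    (acc : List (List Char)) (hf : l.length < fuel) (hocc : ∃ j, sep <+: l.drop j) :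
    ∃ x y, PySem.Chars.splitOnMax.go sep fuel 1 l cur acc = acc.reverse ++ [x, y] := by
  induction fuel generalizing l cur acc with
  | zero => omega
  | succ m ih =>
    cases l with
    | nil =>
      obtain ⟨j, hj⟩ := hocc
      simp at hj
      exact (hsep hj).elim
    | cons c cs =>
      by_cases hpre : sep.isPrefixOf (c :: cs)
      · refine ⟨cur.reverse, List.drop sep.length (c :: cs), ?_⟩
        simp only [PySem.Chars.splitOnMax.go, if_neg (by omega : ¬ (1 : Nat) = 0), if_pos hpre]
        rw [pb_go_zero]
        simp
      · have hocc' : ∃ j, sep <+: cs.drop j := by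
          obtain ⟨j, hj⟩ := hocc
          cases j with
          | zero =>
            rw [List.drop_zero] at hj
            exact absurd (List.isPrefixOf_iff_prefix.mpr hj) hpre
          | succ j' => exact ⟨j', by simpa using hj⟩
        obtain ⟨x, y, hxy⟩ := ih cs (c :: cur) acc (by simp at hf ⊢; omega) hocc'
        refine ⟨x, y, ?_⟩
        simp only [PySem.Chars.splitOnMax.go, if_neg (by omega : ¬ (1 : Nat) = 0), if_neg hpre]
        exact hxy

-- if ": " occurs in s, s.split(": ", 1) yields exactly two parts
theorem pb_split_two (s : String) (h : PySem.Str.isIn ": " s = true) :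
    ∃ k v, PySem.Str.splitMax? s ": " 1 = some [k, v] := by
  have h' : PySem.Chars.isIn [':', ' '] s.toList = true := by simpa using h
  have hocc : ∃ j, [':', ' '] <+: s.toList.drop j :=
    (PySem.Chars.exists_prefix_drop_iff_isIn _ _).mpr h'
  obtain ⟨x, y, hxy⟩ := pb_go_one [':', ' '] (by decide) (s.toList.length + 1) s.toList [] []
    (by omega) hocc
  refine ⟨String.ofList x, String.ofList y, ?_⟩
  unfold PySem.Str.splitMax? PySem.Chars.splitMax? PySem.Chars.splitOnMax
  rw [show (": ".toList) = [':', ' '] from rfl, if_neg (by decide), if_neg (by decide),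
    show ((1 : Int).toNat) = 1 from rfl, hxy]
  simp

-- folding A's step over a separator-free block just inserts the block's pairs into current
theorem pb_foldl_block (block : List String)
    (h : ∀ l ∈ block, PySem.Str.strip l ≠ "---------------")
    (users : List (List (String × String))) (c : PySem.Dict String String) :
    block.foldl pbStep (users, c) =
      (users,
        ((((block.map PySem.Str.strip).filter (fun s => PySem.Str.isIn ": " s)).map
          (fun s => match PySem.Str.splitMax? s ": " 1 with
                    | some [k, v] => (PySem.Str.strip k, PySem.Str.strip v)
                    | _ => ("", ""))).foldl (fun acc p => acc.insert p.1 p.2) c)) := by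
  induction block generalizing c with
  | nil => simp
  | cons l rest ih =>
    have hl := h l (by simp)
    have hrest : ∀ x ∈ rest, PySem.Str.strip x ≠ "---------------" := fun x hx => h x (by simp [hx])
    rw [List.foldl_cons, List.map_cons, List.filter_cons]
    by_cases hin : PySem.Str.isIn ": " (PySem.Str.strip l) = true
    · have hne : PySem.Str.strip l ≠ "" := by
        intro he; rw [he] at hin; exact absurd hin (by decide)
      have hinC : PySem.Chars.isIn [':', ' '] (PySem.Chars.strip l.toList) = true := by
        simpa using hin
      obtain ⟨k, v, hsp⟩ := pb_split_two _ hin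
      have hstep : pbStep (users, c) l =
          (users, c.insert (PySem.Str.strip k) (PySem.Str.strip v)) := by
        simp [pbStep, hl, hne, hinC, hsp]
      rw [hstep, if_pos (show ((fun s => PySem.Str.isIn ": " s) (PySem.Str.strip l)) = true from hin),
        List.map_cons, hsp, List.foldl_cons]
      exact ih hrest _
    · have hin' : PySem.Str.isIn ": " (PySem.Str.strip l) = false := by
        cases hb : PySem.Str.isIn ": " (PySem.Str.strip l) <;> simp_all
      have hin'C : PySem.Chars.isIn [':', ' '] (PySem.Chars.strip l.toList) = false := by
        simpa using hin'
      have hstep : pbStep (users, c) l = (users, c) := by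
        simp [pbStep, hl, hin'C]
      rw [hstep, if_neg (by simp [hin'C])]
      exact ih hrest c

-- a dict whose item list is empty is the empty dict
theorem pb_dict_items_nil (d : PySem.Dict String String) (h : d.items = []) :
    d = PySem.Dict.empty := by
  apply PySem.Dict.ext; simp [h, PySem.Dict.empty]

-- the main invariant: finishing A's fold (started with empty current) = users ++ B's recursion
theorem pb_main (n : Nat) (lines : List String) (hn : lines.length ≤ n)
    (users : List (List (String × String))) :
    (let r := lines.foldl pbStep (users, PySem.Dict.empty)
     if r.2.items ≠ [] then r.1 ++ [r.2.items] else r.1) = users ++ pbAltGo lines := by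
  induction n generalizing lines users with
  | zero =>
    have : lines = [] := List.length_eq_zero_iff.mp (Nat.le_zero.mp hn)
    subst this
    rw [pbAltGo]
    simp [PySem.Dict.empty]
  | succ m ih =>
    match lines with
    | [] => rw [pbAltGo]; simp [PySem.Dict.empty]
    | l :: rest =>
      rw [pbAltGo]
      cases hfind : (l :: rest).findIdx? (fun s => PySem.Str.strip s = "---------------") with
      | none =>
        -- no separator anywhere: the whole list is one block
        have hnosep : ∀ x ∈ (l :: rest), PySem.Str.strip x ≠ "---------------" := by
          intro x hx hx'
          have := List.findIdx?_eq_none_iff.mp hfind x hx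
          simp [hx'] at this
        simp only [Option.getD_none]
        rw [pb_foldl_block _ hnosep]
        have htake : (l :: rest).take (rest.length + 1) = l :: rest := by
          apply List.take_of_length_le; simp
        have hdrop : (l :: rest).drop (rest.length + 1 + 1) = [] := by
          apply List.drop_eq_nil_of_le; simp
        rw [htake, hdrop, pbAltGo]
        simp only [pbAltBlockDict, PySem.Dict.ofList, PySem.Dict.update]
        split <;> simp_all
      | some i =>
        obtain ⟨hi, hpi, hprev⟩ := List.findIdx?_eq_some_iff_getElem.mp hfind
        have hsep : PySem.Str.strip ((l :: rest)[i]) = "---------------" := by simpa using hpi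
        have hpre : ∀ x ∈ (l :: rest).take i, PySem.Str.strip x ≠ "---------------" := by
          intro x hx hx'
          obtain ⟨j, hj, hje⟩ := List.getElem_of_mem hx
          have hj' : j < i := by simp at hj; omega
          have hfalse := hprev j hj'
          rw [List.getElem_take] at hje
          rw [hje] at hfalse
          simp [hx'] at hfalse
        have hdecomp : l :: rest = (l :: rest).take i ++ (l :: rest)[i] :: (l :: rest).drop (i + 1) := by
          rw [List.getElem_cons_drop, List.take_append_drop]
        simp only [Option.getD_some]
        conv_lhs => rw [hdecomp]
        rw [List.foldl_append, pb_foldl_block _ hpre, List.foldl_cons]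
        have hsteplen : ((l :: rest).drop (i + 1)).length ≤ m := by
          simp at hi hn ⊢; omega
        set d := (((((l :: rest).take i).map PySem.Str.strip).filter
            (fun s => PySem.Str.isIn ": " s)).map
            (fun s => match PySem.Str.splitMax? s ": " 1 with
                      | some [k, v] => (PySem.Str.strip k, PySem.Str.strip v)
                      | _ => ("", ""))).foldl (fun acc p => acc.insert p.1 p.2) PySem.Dict.empty with hd
        have hblock : pbAltBlockDict ((l :: rest).take i) = d := by
          rw [pbAltBlockDict, PySem.Dict.ofList, PySem.Dict.update, hd]
        by_cases hne : d.items = []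
        · have hde : d = PySem.Dict.empty := pb_dict_items_nil d hne
          have hstep : pbStep (users, d) ((l :: rest)[i]) = (users, PySem.Dict.empty) := by
            rw [hde]; simp [pbStep, hsep, PySem.Dict.empty]
          rw [hstep, ih _ hsteplen users, hblock]
          simp [hne]
        · have hstep : pbStep (users, d) ((l :: rest)[i]) = (users ++ [d.items], PySem.Dict.empty) := by
            simp [pbStep, hsep, hne]
          rw [hstep, ih _ hsteplen (users ++ [d.items]), hblock]
          simp [hne]

-- ===== VERDICT (by name: the statement is the Claim_ definition above) =====
theorem parse_pdbedit_output_py_spec : Claim_equal_parse_pdbedit_output_py := by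
  intro output _
  unfold Spec_parse_pdbedit_output_py parse_pdbedit_output_py parse_pdbedit_output_py_alt
  simpa using pb_main ((PySem.Str.split? (PySem.Str.strip output) "\n").getD []).length _ le_rfl []
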